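-- pv_equiv track=rewrite | github.com/Raamzeez/dashfinder | server/lib/filtermodel.py | filter_model
-- ===== SOURCE A (Python) =====
-- def filter_model(model_name, company_name):
--     split_text = model_name.split(" ")
--     i = 1
--     if (split_text[0].lower() == company_name.lower()):
--         model_name = ""
--         while (i < len(split_text)):
--             model_name += split_text[i]
--             if (i < len(split_text) - 1):
--                 model_name += " "
--             i += 1
--     return model_name
-- ===== SOURCE B (Python) =====
-- def filter_model(model_name, company_name):
--     parts = model_name.split(" ", 1)
--     if parts[0].lower() == company_name.lower():
--         return parts[1] if len(parts) == 2 else ""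
--     return model_name
-- ===== Notes on version B (the rewrite author's own statement) =====
-- stated objective: simpler
-- what changed: Replaces split-into-a-word-list plus an index-driven while loop that rejoins the tail word by word (with conditional separator re-insertion) with a single maxsplit-1 split at the first space, returning the untouched remainder directly.
import Mathlib
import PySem

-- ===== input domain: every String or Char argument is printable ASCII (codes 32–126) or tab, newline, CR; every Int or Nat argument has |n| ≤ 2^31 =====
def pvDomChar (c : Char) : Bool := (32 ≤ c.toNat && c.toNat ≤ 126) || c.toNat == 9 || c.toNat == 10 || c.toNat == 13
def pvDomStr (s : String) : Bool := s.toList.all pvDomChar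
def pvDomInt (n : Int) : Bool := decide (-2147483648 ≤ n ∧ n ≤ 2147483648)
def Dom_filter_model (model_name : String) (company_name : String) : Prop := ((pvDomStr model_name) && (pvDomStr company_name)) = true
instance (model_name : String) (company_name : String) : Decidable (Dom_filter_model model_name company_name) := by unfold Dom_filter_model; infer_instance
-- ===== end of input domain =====

-- B replaces A's split-into-a-word-list + index-driven rejoin loop by a single maxsplit-1 split,
-- returning the untouched remainder after the first space directly (objective: simpler).

-- ===== PORT A =====
-- the while loop: i from 1; acc += split_text[i]; if i < len - 1: acc += " "; i += 1.
-- split_text is never empty, so the `.getD` defaults are never taken (totality guards only).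
def filterModelLoopA (split_text : List String) (i : Nat) (acc : String) : String :=
  if i < split_text.length then
    let acc1 := acc ++ ((PySem.List.pyGet? split_text (i : Int)).getD "")
    let acc2 := if i < split_text.length - 1 then acc1 ++ " " else acc1
    filterModelLoopA split_text (i + 1) acc2
  else acc
termination_by split_text.length - i

def filter_model (model_name : String) (company_name : String) : String :=
  let split_text := (PySem.Str.split? model_name " ").getD []
  if PySem.Str.lower ((PySem.List.pyGet? split_text 0).getD "") == PySem.Str.lower company_name then
    filterModelLoopA split_text 1 ""
  else model_name

-- ===== PORT B =====
-- parts = model_name.split(" ", 1); parts is never empty, so the `.getD` defaults are never taken.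
def filter_model_alt (model_name : String) (company_name : String) : String :=
  let parts := (PySem.Str.splitMax? model_name " " 1).getD []
  if PySem.Str.lower ((PySem.List.pyGet? parts 0).getD "") == PySem.Str.lower company_name then
    if parts.length = 2 then (PySem.List.pyGet? parts 1).getD "" else ""
  else model_name

-- ===== PRECONDITION & SPEC =====
def Spec_filter_model (model_name : String) (company_name : String) (out : String) : Prop := out = filter_model_alt model_name company_name
instance (model_name : String) (company_name : String) (out : String) : Decidable (Spec_filter_model model_name company_name out) := by unfold Spec_filter_model; infer_instance

-- ===== CLAIM (what is proved, stated in full; the proofs are below) =====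
def Claim_equal_filter_model : Prop := ∀ (model_name : String) (company_name : String), Dom_filter_model model_name company_name → Spec_filter_model model_name company_name (filter_model model_name company_name)

-- ===== LEMMAS AND PROOFS =====

-- clean accumulator model of Chars.splitOn.go for a one-char separator
def splA (c : Char) : List Char → List Char → List (List Char)
  | [], cur => [cur.reverse]
  | d :: rest, cur => if d = c then cur.reverse :: splA c rest [] else splA c rest (d :: cur)

-- clean accumulator model of Chars.splitOnMax.go with maxsplit 1 for a one-char separator
def splB (c : Char) : List Char → List Char → List (List Char)
  | [], cur => [cur.reverse]
  | d :: rest, cur => if d = c then [cur.reverse, rest] else splB c rest (d :: cur)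

theorem go_eq_splA (c : Char) (l : List Char) : ∀ (fuel : Nat) (cur : List Char)
    (acc : List (List Char)), l.length ≤ fuel →
    PySem.Chars.splitOn.go [c] fuel l cur acc = acc.reverse ++ splA c l cur := by
  induction l with
  | nil =>
      intro fuel cur acc _
      cases fuel <;> simp [PySem.Chars.splitOn.go, splA]
  | cons d rest ih =>
      intro fuel cur acc h
      cases fuel with
      | zero => simp at h
      | succ f =>
        simp only [List.length_cons, Nat.succ_le_succ_iff] at h
        by_cases hdc : d = c
        · subst hdc
          rw [show PySem.Chars.splitOn.go [d] (f+1) (d::rest) cur acc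
                = PySem.Chars.splitOn.go [d] f rest [] (cur.reverse :: acc) from by
            simp [PySem.Chars.splitOn.go, List.isPrefixOf]]
          rw [ih f [] _ h]
          simp [splA]
        · rw [show PySem.Chars.splitOn.go [c] (f+1) (d::rest) cur acc
                = PySem.Chars.splitOn.go [c] f rest (d :: cur) acc from by
            simp [PySem.Chars.splitOn.go, List.isPrefixOf, Ne.symm hdc]]
          rw [ih f _ _ h]
          simp [splA, hdc]

theorem goM0 (c : Char) (fuel : Nat) (l cur : List Char) (acc : List (List Char)) :
    PySem.Chars.splitOnMax.go [c] fuel 0 l cur acc = acc.reverse ++ [cur.reverse ++ l] := by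
  cases fuel <;> cases l <;> simp [PySem.Chars.splitOnMax.go]

theorem goM_eq_splB (c : Char) (l : List Char) : ∀ (fuel : Nat) (cur : List Char)
    (acc : List (List Char)), l.length ≤ fuel →
    PySem.Chars.splitOnMax.go [c] fuel 1 l cur acc = acc.reverse ++ splB c l cur := by
  induction l with
  | nil =>
      intro fuel cur acc _
      cases fuel <;> simp [PySem.Chars.splitOnMax.go, splB]
  | cons d rest ih =>
      intro fuel cur acc h
      cases fuel with
      | zero => simp at h
      | succ f =>
        simp only [List.length_cons, Nat.succ_le_succ_iff] at h
        by_cases hdc : d = c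
        · subst hdc
          rw [show PySem.Chars.splitOnMax.go [d] (f+1) 1 (d::rest) cur acc
                = PySem.Chars.splitOnMax.go [d] f 0 rest [] (cur.reverse :: acc) from by
            simp [PySem.Chars.splitOnMax.go, List.isPrefixOf]]
          rw [goM0]
          simp [splB]
        · rw [show PySem.Chars.splitOnMax.go [c] (f+1) 1 (d::rest) cur acc
                = PySem.Chars.splitOnMax.go [c] f 1 rest (d :: cur) acc from by
            simp [PySem.Chars.splitOnMax.go, List.isPrefixOf, Ne.symm hdc]]
          rw [ih f _ _ h]
          simp [splB, hdc]

theorem splitOn_eq_splA (c : Char) (l : List Char) :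
    PySem.Chars.splitOn l [c] = splA c l [] := by
  unfold PySem.Chars.splitOn
  simpa using go_eq_splA c l (l.length + 1) [] [] (by omega)

theorem splitOnMax_eq_splB (c : Char) (l : List Char) :
    PySem.Chars.splitOnMax l [c] 1 = splB c l [] := by
  unfold PySem.Chars.splitOnMax
  simpa using goM_eq_splB c l (l.length + 1) [] [] (by omega)

theorem splA_ne_nil (c : Char) (l : List Char) : ∀ cur, splA c l cur ≠ [] := by
  induction l with
  | nil => intro cur; simp [splA]
  | cons d rest ih => intro cur; by_cases h : d = c <;> simp [splA, h, ih]

theorem splA_not_mem (c : Char) (l : List Char) (h : c ∉ l) : ∀ cur, splA c l cur = [cur.reverse ++ l] := by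
  induction l with
  | nil => intro cur; simp [splA]
  | cons d rest ih =>
      intro cur
      simp only [List.mem_cons, not_or] at h
      simp [splA, Ne.symm h.1, ih h.2]

theorem splB_not_mem (c : Char) (l : List Char) (h : c ∉ l) : ∀ cur, splB c l cur = [cur.reverse ++ l] := by
  induction l with
  | nil => intro cur; simp [splB]
  | cons d rest ih =>
      intro cur
      simp only [List.mem_cons, not_or] at h
      simp [splB, Ne.symm h.1, ih h.2]

theorem splA_mem (c : Char) (a : List Char) (h : c ∉ a) (b : List Char) :
    ∀ cur, splA c (a ++ c :: b) cur = (cur.reverse ++ a) :: splA c b [] := by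
  induction a with
  | nil => intro cur; simp [splA]
  | cons d rest ih =>
      intro cur
      simp only [List.mem_cons, not_or] at h
      simp [splA, Ne.symm h.1, ih h.2]

theorem splB_mem (c : Char) (a : List Char) (h : c ∉ a) (b : List Char) :
    ∀ cur, splB c (a ++ c :: b) cur = [cur.reverse ++ a, b] := by
  induction a with
  | nil => intro cur; simp [splB]
  | cons d rest ih =>
      intro cur
      simp only [List.mem_cons, not_or] at h
      simp [splB, Ne.symm h.1, ih h.2]

theorem join_splA (c : Char) (l : List Char) : ∀ cur,
    PySem.Chars.join [c] (splA c l cur) = cur.reverse ++ l := by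
  induction l with
  | nil => intro cur; simp [splA, PySem.Chars.join_singleton]
  | cons d rest ih =>
      intro cur
      by_cases hdc : d = c
      · subst hdc
        rw [show splA d (d::rest) cur = cur.reverse :: splA d rest [] from by simp [splA]]
        obtain ⟨x, xs, hx⟩ : ∃ x xs, splA d rest [] = x :: xs := by
          cases hsp : splA d rest [] with
          | nil => exact absurd hsp (splA_ne_nil d rest [])
          | cons x xs => exact ⟨x, xs, rfl⟩
        rw [hx, PySem.Chars.join_cons_cons, ← hx, ih []]
        simp
      · rw [show splA c (d::rest) cur = splA c rest (d :: cur) from by simp [splA, hdc]]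
        rw [ih (d :: cur)]
        simp

theorem loopA_toList (ps : List String) : ∀ (k i : Nat) (acc : String), ps.length - i ≤ k →
    (filterModelLoopA ps i acc).toList =
      acc.toList ++ PySem.Chars.join [' '] ((ps.map String.toList).drop i) := by
  intro k
  induction k with
  | zero =>
      intro i acc hk
      have hi : ¬ i < ps.length := by omega
      rw [filterModelLoopA, if_neg hi]
      rw [List.drop_eq_nil_of_le (by simpa using (by omega : ps.length ≤ i))]
      simp [PySem.Chars.join_nil]
  | succ k ih =>
      intro i acc hk
      rw [filterModelLoopA]
      by_cases hi : i < ps.length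
      · rw [if_pos hi]
        rw [ih (i + 1) _ (by omega)]
        have hdrop : (ps.map String.toList).drop i
            = (ps[i]).toList :: (ps.map String.toList).drop (i + 1) := by
          rw [List.drop_eq_getElem_cons (by simpa using hi)]
          simp
        rw [hdrop]
        by_cases hlast : i < ps.length - 1
        · obtain ⟨y, ys, hy⟩ : ∃ y ys, (ps.map String.toList).drop (i + 1) = y :: ys := by
            cases hc : (ps.map String.toList).drop (i + 1) with
            | nil =>
                exfalso
                have := congrArg List.length hc
                simp at this
                omega
            | cons y ys => exact ⟨y, ys, rfl⟩
          rw [hy, PySem.Chars.join_cons_cons, if_pos hlast, ← hy]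
          simp [List.getElem?_eq_getElem hi, String.toList_append]
        · rw [if_neg hlast]
          have : (ps.map String.toList).drop (i + 1) = [] := by
            apply List.drop_eq_nil_of_le; simp; omega
          rw [this]
          simp [PySem.Chars.join_singleton, PySem.Chars.join_nil,
            List.getElem?_eq_getElem hi, String.toList_append]
      · rw [if_neg hi]
        rw [List.drop_eq_nil_of_le (by simpa using (by omega : ps.length ≤ i))]
        simp [PySem.Chars.join_nil]

theorem first_space_decomp (cs : List Char) (h : ' ' ∈ cs) :
    ∃ a b, cs = a ++ ' ' :: b ∧ ' ' ∉ a := by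
  have hne : cs.dropWhile (fun x => x ≠ ' ') ≠ [] := by
    intro hnil
    rw [List.dropWhile_eq_nil_iff] at hnil
    have h2 := hnil ' ' h
    simp at h2
  refine ⟨cs.takeWhile (fun x => x ≠ ' '), (cs.dropWhile (fun x => x ≠ ' ')).tail, ?_, ?_⟩
  · have hhead := List.head_dropWhile_not (l := cs) (p := fun x => x ≠ ' ') hne
    have heq : (cs.dropWhile (fun x => x ≠ ' ')).head hne = ' ' := by simpa using hhead
    conv_lhs => rw [← List.takeWhile_append_dropWhile (p := fun x => x ≠ ' ') (l := cs),
      ← List.cons_head_tail hne, heq]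
  · intro hmem
    have := List.mem_takeWhile_imp hmem
    simp at this

theorem split_eq (model_name : String) :
    (PySem.Str.split? model_name " ").getD []
      = (splA ' ' model_name.toList []).map String.ofList := by
  have hsep : (" " : String).toList = [' '] := by decide
  simp [PySem.Str.split?, PySem.Chars.split?, hsep, splitOn_eq_splA]

theorem splitMax_eq (model_name : String) :
    (PySem.Str.splitMax? model_name " " 1).getD []
      = (splB ' ' model_name.toList []).map String.ofList := by
  have hsep : (" " : String).toList = [' '] := by decide
  simp [PySem.Str.splitMax?, PySem.Chars.splitMax?, hsep, splitOnMax_eq_splB]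

theorem filter_model_spec' (model_name : String) (company_name : String) :
    filter_model model_name company_name = filter_model_alt model_name company_name := by
  unfold filter_model filter_model_alt
  rw [split_eq, splitMax_eq]
  by_cases hmem : ' ' ∈ model_name.toList
  · obtain ⟨a, b, hcs, ha⟩ := first_space_decomp model_name.toList hmem
    rw [hcs, splA_mem ' ' a ha b [], splB_mem ' ' a ha b []]
    simp only [List.reverse_nil, List.nil_append, List.map_cons, List.map_nil]
    by_cases hcond : (PySem.Str.lower ((PySem.List.pyGet? (String.ofList a ::
        (splA ' ' b []).map String.ofList) 0).getD "") == PySem.Str.lower company_name) = true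
    · have hcond' : (PySem.Str.lower ((PySem.List.pyGet? [String.ofList a, String.ofList b] 0).getD "")
          == PySem.Str.lower company_name) = true := by
        simpa [PySem.List.pyGet?_zero] using hcond
      rw [if_pos hcond, if_pos hcond']
      apply String.toList_inj.mp
      rw [loopA_toList _ ((String.ofList a :: (splA ' ' b []).map String.ofList).length) 1 ""
        (by omega)]
      simp [List.map_map, Function.comp_def, join_splA, PySem.List.pyGet?, PySem.List.pyIdx?]
    · have hcond' : ¬ (PySem.Str.lower ((PySem.List.pyGet? [String.ofList a, String.ofList b] 0).getD "")
          == PySem.Str.lower company_name) = true := by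
        simpa [PySem.List.pyGet?_zero] using hcond
      rw [if_neg hcond, if_neg hcond']
  · rw [splA_not_mem ' ' _ hmem [], splB_not_mem ' ' _ hmem []]
    simp only [List.reverse_nil, List.nil_append, List.map_cons, List.map_nil]
    by_cases hcond : (PySem.Str.lower ((PySem.List.pyGet? [String.ofList model_name.toList] 0).getD "")
        == PySem.Str.lower company_name) = true
    · rw [if_pos hcond, if_pos hcond]
      apply String.toList_inj.mp
      rw [loopA_toList _ 1 1 "" (by simp)]
      simp [PySem.Chars.join_nil]
    · rw [if_neg hcond, if_neg hcond]

-- ===== VERDICT (by name: the statement is the Claim_ definition above) =====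
theorem filter_model_spec : Claim_equal_filter_model := by
  intro m c _
  exact filter_model_spec' m c
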